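-- pv_equiv track=rewrite | github.com/andrewyzy/BioLearnTSS | train_prob.py | check_for_subsequence_overlap
-- ===== SOURCE A (Python) =====
-- def generate_subsequences(sequence, window_size=2000):
--     """Generate all possible subsequences of a given length from the sequence."""
--     return set(sequence[i:i+window_size] for i in range(len(sequence) - window_size + 1))
--
-- def check_for_subsequence_overlap(train_data, val_data, window_size=2000):
--     """Check for overlapping subsequences between training and validation datasets."""
--     train_subsequences = set()
--     val_subsequences = set()
--
--     for _, seq, _ in train_data:
--         train_subsequences.update(generate_subsequences(seq, window_size))
--
--     for _, seq, _ in val_data: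
--         val_subsequences.update(generate_subsequences(seq, window_size))
--
--     overlap = train_subsequences.intersection(val_subsequences)
--     return overlap
-- ===== SOURCE B (Python) =====
-- def _occurs(sub, val_data, window_size):
--     """Does sub occur as a length-window slice of some validation sequence?"""
--     return any(vseq[i:i+window_size] == sub
--                for _, vseq, _ in val_data
--                for i in range(len(vseq) - window_size + 1))
--
-- def check_for_subsequence_overlap(train_data, val_data, window_size=2000):
--     """Check for overlapping subsequences between training and validation datasets."""
--     # Brute force: no substring index is ever built.  Each training window is
--     # compared directly against the validation windows; hits are collected into
--     # an ordered list, deduplicated on insertion.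
--     overlap = []
--     for _, seq, _ in train_data:
--         for i in range(len(seq) - window_size + 1):
--             sub = seq[i:i+window_size]
--             if sub not in overlap and _occurs(sub, val_data, window_size):
--                 overlap.append(sub)
--     return set(overlap)
-- ===== Notes on version B (the rewrite author's own statement) =====
-- stated objective: alternative
-- what changed: A hashes every window of both datasets into two sets and intersects them; B builds no index at all: it brute-force compares each training window directly against the validation windows and collects hits into an ordered list deduplicated on insertion.
import Mathlib
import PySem

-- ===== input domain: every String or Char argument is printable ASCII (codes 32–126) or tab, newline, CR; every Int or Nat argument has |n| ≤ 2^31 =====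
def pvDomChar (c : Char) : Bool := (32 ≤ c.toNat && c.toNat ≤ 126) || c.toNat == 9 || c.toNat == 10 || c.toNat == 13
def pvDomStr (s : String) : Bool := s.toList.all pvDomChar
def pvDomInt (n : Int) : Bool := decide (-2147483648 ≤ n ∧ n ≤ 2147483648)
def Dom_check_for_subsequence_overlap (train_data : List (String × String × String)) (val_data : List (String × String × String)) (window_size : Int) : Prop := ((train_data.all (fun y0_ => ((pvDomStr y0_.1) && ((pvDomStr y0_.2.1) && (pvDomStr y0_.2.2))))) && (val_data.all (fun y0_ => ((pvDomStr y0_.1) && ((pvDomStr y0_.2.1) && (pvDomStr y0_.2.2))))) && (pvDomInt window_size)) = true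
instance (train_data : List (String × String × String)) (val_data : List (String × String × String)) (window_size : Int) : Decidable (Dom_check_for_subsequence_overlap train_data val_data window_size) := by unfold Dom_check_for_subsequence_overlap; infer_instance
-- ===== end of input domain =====

-- B replaces the two-set intersection by an index-free brute-force scan: each training window is
-- compared directly against the validation windows, hits collected into a list deduplicated on
-- insertion (alternative decomposition; not faster).


-- ===== PORT A =====
def generate_subsequences (sequence : String) (window_size : Int) : PySem.Set String :=
  PySem.Set.ofList
    ((PySem.List.pyRange 0 ((PySem.Str.len sequence : Int) - window_size + 1) 1).map
      (fun i => PySem.Str.slice sequence (some i) (some (i + window_size))))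

def check_for_subsequence_overlap (train_data : List (String × String × String)) (val_data : List (String × String × String)) (window_size : Int) : List String :=
  let train_subsequences :=
    train_data.foldl (fun s y => PySem.Set.update s (generate_subsequences y.2.1 window_size))
      PySem.Set.empty
  let val_subsequences :=
    val_data.foldl (fun s y => PySem.Set.update s (generate_subsequences y.2.1 window_size))
      PySem.Set.empty
  PySem.Set.inter train_subsequences val_subsequences

-- ===== PORT B =====
-- the any(... for ... for ...) test of Source B's _occurs (early-exit loops = List.any)
def occurs (sub : String) (val_data : List (String × String × String)) (window_size : Int) : Bool :=
  val_data.any (fun y =>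
    (PySem.List.pyRange 0 ((PySem.Str.len y.2.1 : Int) - window_size + 1) 1).any
      (fun i => PySem.Str.slice y.2.1 (some i) (some (i + window_size)) == sub))

def check_for_subsequence_overlap_alt (train_data : List (String × String × String)) (val_data : List (String × String × String)) (window_size : Int) : List String :=
  let overlap :=
    train_data.foldl (fun overlap y =>
      (PySem.List.pyRange 0 ((PySem.Str.len y.2.1 : Int) - window_size + 1) 1).foldl
        (fun overlap i =>
          let sub := PySem.Str.slice y.2.1 (some i) (some (i + window_size))
          if !(overlap.contains sub) && occurs sub val_data window_size
          then overlap ++ [sub] else overlap) overlap) []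
  PySem.Set.ofList overlap

-- ===== PRECONDITION & SPEC =====
def Spec_check_for_subsequence_overlap (train_data : List (String × String × String)) (val_data : List (String × String × String)) (window_size : Int) (out : List String) : Prop := out = check_for_subsequence_overlap_alt train_data val_data window_size
instance (train_data : List (String × String × String)) (val_data : List (String × String × String)) (window_size : Int) (out : List String) : Decidable (Spec_check_for_subsequence_overlap train_data val_data window_size out) := by unfold Spec_check_for_subsequence_overlap; infer_instance

-- ===== CLAIM =====
def Claim_equal_check_for_subsequence_overlap : Prop := ∀ (train_data : List (String × String × String)) (val_data : List (String × String × String)) (window_size : Int), Dom_check_for_subsequence_overlap train_data val_data window_size → Spec_check_for_subsequence_overlap train_data val_data window_size (check_for_subsequence_overlap train_data val_data window_size)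

-- ===== LEMMAS AND PROOFS =====

-- the list of length-`ws` windows of `seq`, in order
def pvWindows (seq : String) (ws : Int) : List String :=
  (PySem.List.pyRange 0 ((PySem.Str.len seq : Int) - ws + 1) 1).map
    (fun i => PySem.Str.slice seq (some i) (some (i + ws)))

theorem pv_gen_eq (seq : String) (ws : Int) :
    generate_subsequences seq ws = PySem.Set.ofList (pvWindows seq ws) := rfl

theorem pv_add_of_mem {α : Type} [BEq α] [LawfulBEq α] {s : PySem.Set α} {x : α}
    (h : x ∈ s) : s.add x = s := by
  show (if PySem.Set.contains s x = true then s else s ++ [x]) = s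
  rw [if_pos ((PySem.Set.contains_iff s x).mpr h)]

theorem pv_update_add {α : Type} [BEq α] [LawfulBEq α] (s r : PySem.Set α) (x : α) :
    PySem.Set.update s (r.add x) = (PySem.Set.update s r).add x := by
  by_cases hx : x ∈ r
  · rw [pv_add_of_mem hx, pv_add_of_mem ((PySem.Set.mem_update s r x).mpr (Or.inr hx))]
  · have : r.add x = r ++ [x] := by
      show (if PySem.Set.contains r x = true then r else r ++ [x]) = r ++ [x]
      rw [if_neg (fun hc => hx ((PySem.Set.contains_iff r x).mp hc))]
    rw [this]
    show List.foldl PySem.Set.add s (r ++ [x]) = (PySem.Set.update s r).add x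
    rw [List.foldl_append]; rfl

theorem pv_update_update {α : Type} [BEq α] [LawfulBEq α] (l : List α) (r s : PySem.Set α) :
    PySem.Set.update s (PySem.Set.update r l) = PySem.Set.update (PySem.Set.update s r) l := by
  induction l generalizing r s with
  | nil => rfl
  | cons x l ih =>
    show PySem.Set.update s (PySem.Set.update (r.add x) l)
        = PySem.Set.update ((PySem.Set.update s r).add x) l
    rw [ih, pv_update_add]

theorem pv_update_ofList {α : Type} [BEq α] [LawfulBEq α] (s : PySem.Set α) (l : List α) :
    PySem.Set.update s (PySem.Set.ofList l) = PySem.Set.update s l := by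
  show PySem.Set.update s (PySem.Set.update PySem.Set.empty l) = _
  rw [pv_update_update]; rfl

-- membership in the accumulated validation set is exactly Source B's _occurs test
theorem pv_mem_valset (val_data : List (String × String × String)) (ws : Int) (w : String) :
    (w ∈ val_data.foldl
        (fun s y => PySem.Set.update s (PySem.Set.ofList (pvWindows y.2.1 ws)))
        (PySem.Set.empty (α := String)))
      ↔ occurs w val_data ws = true := by
  have key : ∀ (d : List (String × String × String)) (s : PySem.Set String),
      (w ∈ d.foldl (fun s y => PySem.Set.update s (PySem.Set.ofList (pvWindows y.2.1 ws))) s)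
        ↔ w ∈ s ∨ ∃ y ∈ d, w ∈ pvWindows y.2.1 ws := by
    intro d
    induction d with
    | nil => intro s; simp
    | cons y d ih =>
      intro s
      rw [List.foldl_cons, ih, PySem.Set.mem_update, PySem.Set.mem_ofList]
      simp only [List.mem_cons]
      constructor
      · rintro (⟨h | h⟩ | ⟨z, hz, hw⟩)
        · exact Or.inl h
        · exact Or.inr ⟨y, Or.inl rfl, h⟩
        · exact Or.inr ⟨z, Or.inr hz, hw⟩
      · rintro (h | ⟨z, (rfl | hz), hw⟩)
        · exact Or.inl (Or.inl h)
        · exact Or.inl (Or.inr hw)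
        · exact Or.inr ⟨z, hz, hw⟩
  rw [key, occurs]
  simp only [PySem.Set.empty, List.not_mem_nil, false_or, List.any_eq_true, List.mem_map,
    pvWindows, beq_iff_eq]

theorem pv_inter_add {α : Type} [BEq α] [LawfulBEq α] (s t : PySem.Set α) (x : α) :
    PySem.Set.inter (s.add x) t
      = if t.contains x = true then (PySem.Set.inter s t).add x else PySem.Set.inter s t := by
  by_cases hx : x ∈ s
  · rw [pv_add_of_mem hx]
    by_cases ht : t.contains x = true
    · have hmem : x ∈ PySem.Set.inter s t := List.mem_filter.mpr ⟨hx, ht⟩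
      rw [if_pos ht, pv_add_of_mem hmem]
    · rw [if_neg ht]
  · have hxa : s.add x = s ++ [x] := by
      show (if PySem.Set.contains s x = true then s else s ++ [x]) = s ++ [x]
      rw [if_neg (fun hc => hx ((PySem.Set.contains_iff s x).mp hc))]
    rw [hxa]
    show List.filter (fun y => PySem.Set.contains t y) (s ++ [x]) = _
    rw [List.filter_append]
    by_cases ht : t.contains x = true
    · have hni : x ∉ PySem.Set.inter s t := fun h => hx (List.mem_of_mem_filter h)
      have hna : (PySem.Set.inter s t).add x = PySem.Set.inter s t ++ [x] := by
        show (if PySem.Set.contains (PySem.Set.inter s t) x = true then _ else _) = _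
        rw [if_neg (fun hc => hni ((PySem.Set.contains_iff _ _).mp hc))]
      rw [if_pos ht, hna,
        show List.filter (fun y => PySem.Set.contains t y) [x] = [x] from by
          rw [List.filter_cons, if_pos ht]; rfl]
      rfl
    · rw [if_neg ht,
        show List.filter (fun y => PySem.Set.contains t y) [x] = [] from by
          rw [List.filter_cons, if_neg ht]; rfl,
        List.append_nil]
      rfl

-- one training window: A's filtered set evolves exactly like B's hit list
theorem pv_step (V : PySem.Set String) (val_data : List (String × String × String)) (ws : Int)
    (hV : ∀ x, (x ∈ V) ↔ occurs x val_data ws = true)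
    (s : PySem.Set String) (w : String) :
    PySem.Set.inter (s.add w) V
      = (if !(List.contains (PySem.Set.inter s V) w) && occurs w val_data ws
         then PySem.Set.inter s V ++ [w] else PySem.Set.inter s V) := by
  rw [pv_inter_add]
  by_cases hocc : occurs w val_data ws = true
  · have hVc : V.contains w = true := (PySem.Set.contains_iff V w).mpr ((hV w).mpr hocc)
    rw [if_pos hVc, hocc, Bool.and_true]
    by_cases hr : List.contains (PySem.Set.inter s V) w = true
    · rw [pv_add_of_mem (List.contains_iff_mem.mp hr), hr]
      rfl
    · have hadd : (PySem.Set.inter s V).add w = PySem.Set.inter s V ++ [w] := by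
        show (if PySem.Set.contains (PySem.Set.inter s V) w = true then _ else _) = _
        rw [if_neg (fun hc => hr (by
          rw [List.contains_iff_mem]; exact (PySem.Set.contains_iff _ _).mp hc))]
      rw [hadd, Bool.eq_false_iff.mpr hr]
      rfl
  · have hVc : ¬ V.contains w = true := fun hc =>
      hocc ((hV w).mp ((PySem.Set.contains_iff V w).mp hc))
    rw [if_neg hVc, Bool.eq_false_iff.mpr hocc, Bool.and_false, if_neg (by simp)]

theorem pv_main (V : PySem.Set String) (val_data : List (String × String × String)) (ws : Int)
    (hV : ∀ x, (x ∈ V) ↔ occurs x val_data ws = true) :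
    ∀ (d : List (String × String × String)) (s : PySem.Set String),
      PySem.Set.inter
        (d.foldl (fun s y => PySem.Set.update s (PySem.Set.ofList (pvWindows y.2.1 ws))) s) V
      = d.foldl
          (fun r y => (pvWindows y.2.1 ws).foldl
            (fun r w => if !(List.contains r w) && occurs w val_data ws then r ++ [w] else r) r)
          (PySem.Set.inter s V) := by
  intro d
  induction d with
  | nil => intro s; rfl
  | cons y d ih =>
    intro s
    rw [List.foldl_cons, List.foldl_cons, ih, pv_update_ofList]
    congr 1
    show PySem.Set.inter (List.foldl PySem.Set.add s (pvWindows y.2.1 ws)) V = _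
    generalize pvWindows y.2.1 ws = l
    induction l generalizing s with
    | nil => rfl
    | cons w l ihl =>
      rw [List.foldl_cons, List.foldl_cons, ihl, pv_step V val_data ws hV]

-- ===== VERDICT =====
theorem check_for_subsequence_overlap_spec : Claim_equal_check_for_subsequence_overlap := by
  intro train_data val_data ws _
  show check_for_subsequence_overlap train_data val_data ws
      = check_for_subsequence_overlap_alt train_data val_data ws
  unfold check_for_subsequence_overlap check_for_subsequence_overlap_alt
  simp only [pv_gen_eq]
  set V := val_data.foldl
      (fun s y => PySem.Set.update s (PySem.Set.ofList (pvWindows y.2.1 ws)))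
      (PySem.Set.empty (α := String)) with hVdef
  have hV : ∀ x, (x ∈ V) ↔ occurs x val_data ws = true := fun x => pv_mem_valset val_data ws x
  -- B's inner index-loop is a fold over the window list
  have hInner : (fun (r : List String) (y : String × String × String) =>
      (PySem.List.pyRange 0 ((PySem.Str.len y.2.1 : Int) - ws + 1) 1).foldl
        (fun r i =>
          let sub := PySem.Str.slice y.2.1 (some i) (some (i + ws))
          if !(r.contains sub) && occurs sub val_data ws then r ++ [sub] else r) r)
    = (fun r y => (pvWindows y.2.1 ws).foldl
        (fun r w => if !(List.contains r w) && occurs w val_data ws then r ++ [w] else r) r) := by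
    funext r y
    rw [pvWindows, List.foldl_map]
  rw [hInner]
  have hmain := pv_main V val_data ws hV train_data PySem.Set.empty
  rw [show PySem.Set.inter (PySem.Set.empty (α := String)) V = [] from rfl] at hmain
  rw [← hmain]
  -- A's result is Nodup, so Source B's final set(overlap) is the identity on it
  have hnodupA : (PySem.Set.inter
      (train_data.foldl (fun s y => PySem.Set.update s (PySem.Set.ofList (pvWindows y.2.1 ws)))
        (PySem.Set.empty (α := String))) V).Nodup := by
    apply PySem.Set.nodup_inter
    have : ∀ (d : List (String × String × String)) (s : PySem.Set String), s.Nodup →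
        (d.foldl (fun s y => PySem.Set.update s (PySem.Set.ofList (pvWindows y.2.1 ws))) s).Nodup := by
      intro d
      induction d with
      | nil => intro s hs; exact hs
      | cons y d ih =>
        intro s hs
        exact ih _ (PySem.Set.nodup_update s _ hs)
    exact this train_data PySem.Set.empty List.nodup_nil
  rw [PySem.Set.ofList_eq_self_of_nodup _ hnodupA]
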